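-- pv_equiv track=rewrite | github.com/D-V-Patterson/PyMSDb | pymsdb/taxonomy.py | lcd
-- ===== SOURCE A (Python) =====
-- longgun_lvl_3 = ['Shotgun','Rifle']
--
-- handgun_lvl_3 = ['Revolver','Pistol','Derringer']
--
-- rifle_lvl_4 = ['Tactical Rifle','Tactical Carbine','Carbine']
--
-- tac_rifle_lvl_5 = ['AKM Rifle','AR-15 Rifle','AR-10 Rifle']
--
-- pistol_lvl_4 = ['Tactical Pistol']
--
-- tac_pistol_lvl_5 = ['SMG','AR-15 Pistol']
--
-- def firearm_lvl_2(wtype):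
--     if is_handgun(wtype): return 'Handgun'
--     elif is_longgun(wtype): return 'Long gun'
--     else: return None
--
-- def is_handgun(wtype):
--     return wtype in tac_pistol_lvl_5 + pistol_lvl_4 + handgun_lvl_3 + ['Handgun']
--
-- def is_longgun(wtype):
--     return wtype in tac_rifle_lvl_5 + rifle_lvl_4 + longgun_lvl_3 + ['Long gun']
--
-- def firearm_lvl_3(wtype):
--     if is_shotgun(wtype): return 'Shotgun'
--     elif is_rifle(wtype): return 'Rifle'
--     elif is_pistol(wtype): return 'Pistol'
--     elif is_revolver(wtype): return 'Revolver'
--     elif is_derringer(wtype): return 'Derringer'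
--     else: return None
--
-- def is_shotgun(wtype): return wtype == 'Shotgun'
--
-- def is_rifle(wtype): return wtype in tac_rifle_lvl_5 + rifle_lvl_4 + ['Rifle']
--
-- def is_revolver(wtype): return wtype == 'Revolver'
--
-- def is_derringer(wtype): return wtype == 'Derringer'
--
-- def is_pistol(wtype): return wtype in pistol_lvl_4 + tac_pistol_lvl_5 + ['Pistol']
--
-- def firearm_lvl_4(wtype):
--     if is_carbine(wtype): return 'Carbine'
--     elif is_tac_rifle(wtype): return 'Tactical Rifle'
--     elif is_tac_pistol(wtype): return 'Tactical Pistol'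
--     else: return None
--
-- def is_carbine(wtype): return wtype == 'Carbine'
--
-- def is_tac_rifle(wtype): return wtype in tac_rifle_lvl_5 + ['Tactical Rifle']
--
-- def is_tac_pistol(wtype): return wtype in tac_pistol_lvl_5 + ['Tactical Pistol']
--
-- def firearm_lvl_5(wtype):
--     if wtype in tac_pistol_lvl_5: return wtype
--     elif wtype in tac_rifle_lvl_5: return wtype
--     else: return None
--
-- def lcd(wtypes):
--     # remove duplicates, then check if all types are the same
--     ws = list(set(wtypes))
--     if len(ws) == 1: return ws[0]
--
--     # check for 5th level commonness
--     ws5 = [firearm_lvl_5(w) for w in ws]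
--     if len(list(set(ws5))) == 1 and ws5[0] is not None: return ws5[0]
--
--     # check for 4th level commonness
--     ws4 = [firearm_lvl_4(w) for w in ws]
--     if len(list(set(ws4))) == 1 and ws4[0] is not None: return ws4[0]
--
--     # check for 3rd level commonness
--     ws3 = [firearm_lvl_3(w) for w in ws]
--     if len(list(set(ws3))) == 1 and ws3[0] is not None: return ws3[0]
--
--     # check for 2nd level commonness
--     ws2 = [firearm_lvl_2(w) for w in ws]
--     if len(list(set(ws2))) == 1 and ws2[0] is not None: return ws2[0]
--
--     return 'Firearm'
-- ===== SOURCE B (Python) =====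
-- # B: tree re-implementation ("alternative" decomposition): the taxonomy is a parent-pointer
-- # tree rooted at 'Firearm'; each weapon type maps to its tree node and the answer is a single
-- # left fold of a binary lowest-common-ancestor meet over the input (no per-level staged passes,
-- # no dedup pass: meet is idempotent).  The all-equal early return and empty->'Firearm' match A.
--
-- _PARENT = {
--     'SMG': 'Tactical Pistol', 'AR-15 Pistol': 'Tactical Pistol',
--     'AKM Rifle': 'Tactical Rifle', 'AR-15 Rifle': 'Tactical Rifle', 'AR-10 Rifle': 'Tactical Rifle',
--     'Tactical Pistol': 'Pistol', 'Tactical Rifle': 'Rifle', 'Carbine': 'Rifle',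
--     'Pistol': 'Handgun', 'Revolver': 'Handgun', 'Derringer': 'Handgun',
--     'Shotgun': 'Long gun', 'Rifle': 'Long gun',
--     'Handgun': 'Firearm', 'Long gun': 'Firearm',
-- }
--
-- def _node(w):
--     # 'Tactical Carbine' has no category identity of its own in the taxonomy: it classifies as Rifle
--     if w in _PARENT:
--         return w
--     return 'Rifle' if w == 'Tactical Carbine' else 'Firearm'
--
-- def _depth(n):
--     d = 0
--     while n != 'Firearm':
--         n = _PARENT.get(n, 'Firearm')
--         d += 1
--     return d
--
-- def _meet(a, b):
--     da, db = _depth(a), _depth(b)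
--     while da > db:
--         a, da = _PARENT.get(a, 'Firearm'), da - 1
--     while db > da:
--         b, db = _PARENT.get(b, 'Firearm'), db - 1
--     while a != b:
--         a = _PARENT.get(a, 'Firearm')
--         b = _PARENT.get(b, 'Firearm')
--     return a
--
-- def lcd(wtypes):
--     if wtypes and all(w == wtypes[0] for w in wtypes):
--         return wtypes[0]
--     acc = None
--     for w in wtypes:
--         n = _node(w)
--         acc = n if acc is None else _meet(acc, n)
--     return 'Firearm' if acc is None else acc
-- ===== Notes on version B (the rewrite author's own statement) =====
-- stated objective: faster
-- what changed: Replaces A's staged per-level passes (rebuilding a mapped list and a deduplicating set for each of the four category levels) with a parent-pointer taxonomy tree and a single left fold of a binary lowest-common-ancestor meet over the input, with no dedup pass (meet is idempotent).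
import Mathlib
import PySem

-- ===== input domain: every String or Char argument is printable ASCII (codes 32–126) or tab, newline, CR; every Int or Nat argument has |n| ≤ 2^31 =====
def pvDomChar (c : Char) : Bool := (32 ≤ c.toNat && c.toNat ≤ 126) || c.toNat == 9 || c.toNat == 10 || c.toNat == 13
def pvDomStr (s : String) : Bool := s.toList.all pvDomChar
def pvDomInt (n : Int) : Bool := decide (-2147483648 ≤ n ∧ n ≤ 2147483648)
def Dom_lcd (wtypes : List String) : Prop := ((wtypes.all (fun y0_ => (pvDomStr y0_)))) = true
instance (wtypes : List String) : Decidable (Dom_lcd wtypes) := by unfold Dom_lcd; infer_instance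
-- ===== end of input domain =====

-- B re-implements A's staged per-level passes as one left fold of a binary lowest-common-ancestor
-- meet over a parent-pointer taxonomy tree (objective: faster; measured).
-- A's 'list(set(wtypes))' is ported as PySem.Set.ofList; the set's iteration order cannot affect
-- A's result (a value is only returned when all mapped entries coincide), so this port is exact.

-- ===== PORT A =====
def longgun_lvl_3 : List String := ["Shotgun", "Rifle"]
def handgun_lvl_3 : List String := ["Revolver", "Pistol", "Derringer"]
def rifle_lvl_4 : List String := ["Tactical Rifle", "Tactical Carbine", "Carbine"]
def tac_rifle_lvl_5 : List String := ["AKM Rifle", "AR-15 Rifle", "AR-10 Rifle"]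
def pistol_lvl_4 : List String := ["Tactical Pistol"]
def tac_pistol_lvl_5 : List String := ["SMG", "AR-15 Pistol"]

def is_handgun (w : String) : Bool := (tac_pistol_lvl_5 ++ pistol_lvl_4 ++ handgun_lvl_3 ++ ["Handgun"]).contains w
def is_longgun (w : String) : Bool := (tac_rifle_lvl_5 ++ rifle_lvl_4 ++ longgun_lvl_3 ++ ["Long gun"]).contains w
def firearm_lvl_2 (w : String) : Option String :=
  if is_handgun w then some "Handgun" else if is_longgun w then some "Long gun" else none

def is_shotgun (w : String) : Bool := w == "Shotgun"
def is_rifle (w : String) : Bool := (tac_rifle_lvl_5 ++ rifle_lvl_4 ++ ["Rifle"]).contains w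
def is_revolver (w : String) : Bool := w == "Revolver"
def is_derringer (w : String) : Bool := w == "Derringer"
def is_pistol (w : String) : Bool := (pistol_lvl_4 ++ tac_pistol_lvl_5 ++ ["Pistol"]).contains w
def firearm_lvl_3 (w : String) : Option String :=
  if is_shotgun w then some "Shotgun"
  else if is_rifle w then some "Rifle"
  else if is_pistol w then some "Pistol"
  else if is_revolver w then some "Revolver"
  else if is_derringer w then some "Derringer"
  else none

def is_carbine (w : String) : Bool := w == "Carbine"
def is_tac_rifle (w : String) : Bool := (tac_rifle_lvl_5 ++ ["Tactical Rifle"]).contains w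
def is_tac_pistol (w : String) : Bool := (tac_pistol_lvl_5 ++ ["Tactical Pistol"]).contains w
def firearm_lvl_4 (w : String) : Option String :=
  if is_carbine w then some "Carbine"
  else if is_tac_rifle w then some "Tactical Rifle"
  else if is_tac_pistol w then some "Tactical Pistol"
  else none

def firearm_lvl_5 (w : String) : Option String :=
  if tac_pistol_lvl_5.contains w then some w
  else if tac_rifle_lvl_5.contains w then some w
  else none

-- 'if len(set(ws_i)) == 1 and ws_i[0] is not None: return ws_i[0]'; ws_i[0].getD "" is only
-- reached under 'headD none ≠ none', so the default is never used.
def lcd (wtypes : List String) : String :=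
  let ws := PySem.Set.ofList wtypes
  if ws.length = 1 then ws.headD "" else
  let ws5 := ws.map firearm_lvl_5
  if (PySem.Set.ofList ws5).length = 1 ∧ ws5.headD none ≠ none then (ws5.headD none).getD "" else
  let ws4 := ws.map firearm_lvl_4
  if (PySem.Set.ofList ws4).length = 1 ∧ ws4.headD none ≠ none then (ws4.headD none).getD "" else
  let ws3 := ws.map firearm_lvl_3
  if (PySem.Set.ofList ws3).length = 1 ∧ ws3.headD none ≠ none then (ws3.headD none).getD "" else
  let ws2 := ws.map firearm_lvl_2
  if (PySem.Set.ofList ws2).length = 1 ∧ ws2.headD none ≠ none then (ws2.headD none).getD "" else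
  "Firearm"

-- ===== PORT B =====
def pvParent : PySem.Dict String String := PySem.Dict.ofList [
  ("SMG", "Tactical Pistol"), ("AR-15 Pistol", "Tactical Pistol"),
  ("AKM Rifle", "Tactical Rifle"), ("AR-15 Rifle", "Tactical Rifle"), ("AR-10 Rifle", "Tactical Rifle"),
  ("Tactical Pistol", "Pistol"), ("Tactical Rifle", "Rifle"), ("Carbine", "Rifle"),
  ("Pistol", "Handgun"), ("Revolver", "Handgun"), ("Derringer", "Handgun"),
  ("Shotgun", "Long gun"), ("Rifle", "Long gun"),
  ("Handgun", "Firearm"), ("Long gun", "Firearm")]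

def nodeOf (w : String) : String :=
  if PySem.Dict.contains pvParent w then w
  else if w == "Tactical Carbine" then "Rifle" else "Firearm"

-- _PARENT.get(n, 'Firearm')
def parentGet (n : String) : String := PySem.Dict.getD pvParent n "Firearm"

-- 'while n != "Firearm"': every parent chain reaches 'Firearm' in at most 4 steps; the fuel
-- (8) only totalises the loop, it is never exhausted on the values _depth is applied to.
def depthLoop : Nat → String → Nat → Nat
  | 0, _, d => d
  | fuel + 1, n, d => if n == "Firearm" then d else depthLoop fuel (parentGet n) (d + 1)
def depthS (n : String) : Nat := depthLoop 8 n 0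

-- the two depth-equalising 'while da > db' loops: climb k parent steps
def climb : Nat → String → String
  | 0, a => a
  | k + 1, a => climb k (parentGet a)

-- 'while a != b': after equalising, both sides reach 'Firearm' together; fuel 8 totalises it.
def meetLoop : Nat → String → String → String
  | 0, a, _ => a
  | fuel + 1, a, b => if a == b then a else meetLoop fuel (parentGet a) (parentGet b)

def meetS (a b : String) : String :=
  let da := depthS a
  let db := depthS b
  meetLoop 8 (climb (da - db) a) (climb (db - da) b)

def lcd_alt (wtypes : List String) : String :=
  if wtypes ≠ [] ∧ wtypes.all (fun x => x == wtypes.headD "") then wtypes.headD ""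
  else
    match wtypes.foldl (fun acc w =>
        let n := nodeOf w
        match acc with
        | none => some n
        | some a => some (meetS a n)) (none : Option String) with
    | none => "Firearm"
    | some acc => acc

-- ===== PRECONDITION & SPEC =====
def Spec_lcd (wtypes : List String) (out : String) : Prop := out = lcd_alt wtypes
instance (wtypes : List String) (out : String) : Decidable (Spec_lcd wtypes out) := by unfold Spec_lcd; infer_instance

-- ===== CLAIM (what is proved, stated in full; the proofs are below) =====
def Claim_equal_lcd : Prop := ∀ (wtypes : List String), Dom_lcd wtypes → Spec_lcd wtypes (lcd wtypes)

-- ===== LEMMAS AND PROOFS =====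

-- The taxonomy as a finite tree (proof-side abstraction of both programs)
inductive Node
  | firearm | handgun | longgun
  | revolver | pistol | derringer | shotgun | rifle
  | carbine | tacRifle | tacPistol
  | akm | ar15r | ar10r | smg | ar15p
deriving DecidableEq, Repr

def Node.name : Node → String
  | .firearm => "Firearm" | .handgun => "Handgun" | .longgun => "Long gun"
  | .revolver => "Revolver" | .pistol => "Pistol" | .derringer => "Derringer"
  | .shotgun => "Shotgun" | .rifle => "Rifle"
  | .carbine => "Carbine" | .tacRifle => "Tactical Rifle" | .tacPistol => "Tactical Pistol"
  | .akm => "AKM Rifle" | .ar15r => "AR-15 Rifle" | .ar10r => "AR-10 Rifle"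
  | .smg => "SMG" | .ar15p => "AR-15 Pistol"

def parentN : Node → Node
  | .firearm => .firearm | .handgun => .firearm | .longgun => .firearm
  | .revolver => .handgun | .pistol => .handgun | .derringer => .handgun
  | .shotgun => .longgun | .rifle => .longgun
  | .carbine => .rifle | .tacRifle => .rifle | .tacPistol => .pistol
  | .akm => .tacRifle | .ar15r => .tacRifle | .ar10r => .tacRifle
  | .smg => .tacPistol | .ar15p => .tacPistol

def levelN : Node → Nat
  | .firearm => 0 | .handgun => 1 | .longgun => 1
  | .revolver => 2 | .pistol => 2 | .derringer => 2 | .shotgun => 2 | .rifle => 2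
  | .carbine => 3 | .tacRifle => 3 | .tacPistol => 3
  | .akm => 4 | .ar15r => 4 | .ar10r => 4 | .smg => 4 | .ar15p => 4

def upN : Nat → Node → Node
  | 0, a => a
  | k + 1, a => upN k (parentN a)

def meetLoopN : Nat → Node → Node → Node
  | 0, a, _ => a
  | f + 1, a, b => if a = b then a else meetLoopN f (parentN a) (parentN b)

def meetN (a b : Node) : Node :=
  meetLoopN 8 (upN (levelN a - levelN b) a) (upN (levelN b - levelN a) b)

def ancN (k : Nat) (n : Node) : Option Node :=
  if k ≤ levelN n then some (upN (levelN n - k) n) else none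

def FoldN (n : Node) (ms : List Node) : Node := ms.foldl meetN n

def toNode (w : String) : Node :=
  if w == "SMG" then .smg else if w == "AR-15 Pistol" then .ar15p
  else if w == "AKM Rifle" then .akm else if w == "AR-15 Rifle" then .ar15r
  else if w == "AR-10 Rifle" then .ar10r
  else if w == "Tactical Pistol" then .tacPistol else if w == "Tactical Rifle" then .tacRifle
  else if w == "Carbine" then .carbine else if w == "Tactical Carbine" then .rifle
  else if w == "Pistol" then .pistol else if w == "Revolver" then .revolver
  else if w == "Derringer" then .derringer
  else if w == "Shotgun" then .shotgun else if w == "Rifle" then .rifle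
  else if w == "Handgun" then .handgun else if w == "Long gun" then .longgun
  else .firearm

def allNodes : List Node :=
  [.firearm, .handgun, .longgun, .revolver, .pistol, .derringer, .shotgun, .rifle,
   .carbine, .tacRifle, .tacPistol, .akm, .ar15r, .ar10r, .smg, .ar15p]

lemma mem_allNodes (n : Node) : n ∈ allNodes := by cases n <;> simp [allNodes]

lemma level_le4 (n : Node) : levelN n ≤ 4 := by cases n <;> decide

lemma level_zero (n : Node) (h : levelN n = 0) : n = Node.firearm := by
  cases n <;> first | rfl | (exact absurd h (by decide))

lemma name_inj (a b : Node) (h : a.name = b.name) : a = b := by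
  cases a <;> cases b <;> first | rfl | (exact absurd h (by decide))

lemma anc_self (n : Node) : ancN (levelN n) n = some n := by
  simp [ancN, upN]

lemma anc_le (n c : Node) (k : Nat) (h : ancN k n = some c) : k ≤ levelN n := by
  by_cases hk : k ≤ levelN n
  · exact hk
  · simp [ancN, hk] at h

-- binary LCA: a node is a common ancestor of a and b iff it is an ancestor of meetN a b
lemma checkC1 : ((List.range 5).all (fun k => allNodes.all (fun a => allNodes.all (fun b =>
    allNodes.all (fun c =>
      decide ((ancN k a = some c ∧ ancN k b = some c) ↔ ancN k (meetN a b) = some c)))))) = true := by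
  decide

lemma meet_anc (k : Nat) (a b c : Node) :
    (ancN k a = some c ∧ ancN k b = some c) ↔ ancN k (meetN a b) = some c := by
  by_cases hk : k ≤ 4
  · have h := checkC1
    rw [List.all_eq_true] at h
    have h := h k (by simp [List.mem_range]; omega)
    rw [List.all_eq_true] at h
    have h := h a (mem_allNodes a)
    rw [List.all_eq_true] at h
    have h := h b (mem_allNodes b)
    rw [List.all_eq_true] at h
    have h := h c (mem_allNodes c)
    exact of_decide_eq_true h
  · constructor
    · rintro ⟨h1, _⟩
      exact absurd (le_trans (anc_le a c k h1) (level_le4 a)) hk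
    · intro h
      exact absurd (le_trans (anc_le _ c k h) (level_le4 _)) hk

-- common ancestors of a nonempty list = ancestors of its meet-fold
lemma fold_anc (ms : List Node) (n : Node) (k : Nat) (c : Node) :
    (ancN k n = some c ∧ ∀ m ∈ ms, ancN k m = some c) ↔ ancN k (FoldN n ms) = some c := by
  induction ms generalizing n with
  | nil => simp [FoldN]
  | cons m ms ih =>
    have hstep : FoldN n (m :: ms) = FoldN (meetN n m) ms := rfl
    rw [hstep, ← ih, ← meet_anc]
    simp [List.forall_mem_cons, and_assoc]

-- two nodes with the same ancestors are equal
lemma anc_ext (M1 M2 : Node) (h : ∀ k c, ancN k M1 = some c ↔ ancN k M2 = some c) : M1 = M2 := by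
  have h1 : ancN (levelN M1) M2 = some M1 := (h _ _).mp (anc_self M1)
  have h2 : ancN (levelN M2) M1 = some M2 := (h _ _).mpr (anc_self M2)
  have e1 := anc_le M2 M1 _ h1
  have e2 := anc_le M1 M2 _ h2
  have e : levelN M1 = levelN M2 := le_antisymm e1 e2
  rw [e] at h1
  rw [anc_self M2] at h1
  exact (Option.some_injective _ h1).symm

lemma FoldN_congr (n : Node) (ms1 ms2 : List Node)
    (h : ∀ x : Node, (x = n ∨ x ∈ ms1) ↔ (x = n ∨ x ∈ ms2)) : FoldN n ms1 = FoldN n ms2 := by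
  apply anc_ext
  intro k c
  rw [← fold_anc, ← fold_anc]
  constructor
  · rintro ⟨hn, hall⟩
    refine ⟨hn, fun m hm => ?_⟩
    rcases (h m).mpr (Or.inr hm) with rfl | hm1
    · exact hn
    · exact hall m hm1
  · rintro ⟨hn, hall⟩
    refine ⟨hn, fun m hm => ?_⟩
    rcases (h m).mp (Or.inr hm) with rfl | hm2
    · exact hn
    · exact hall m hm2

-- ---- bridges between the string-level ports and the Node abstraction ----

lemma parent_mk : pvParent = PySem.Dict.mk [
  ("SMG", "Tactical Pistol"), ("AR-15 Pistol", "Tactical Pistol"),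
  ("AKM Rifle", "Tactical Rifle"), ("AR-15 Rifle", "Tactical Rifle"), ("AR-10 Rifle", "Tactical Rifle"),
  ("Tactical Pistol", "Pistol"), ("Tactical Rifle", "Rifle"), ("Carbine", "Rifle"),
  ("Pistol", "Handgun"), ("Revolver", "Handgun"), ("Derringer", "Handgun"),
  ("Shotgun", "Long gun"), ("Rifle", "Long gun"),
  ("Handgun", "Firearm"), ("Long gun", "Firearm")] := by rfl

lemma nodeOf_eq (w : String) : nodeOf w = (toNode w).name := by
  by_cases e1 : w = "SMG"; · subst e1; decide
  by_cases e2 : w = "AR-15 Pistol"; · subst e2; decide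
  by_cases e3 : w = "AKM Rifle"; · subst e3; decide
  by_cases e4 : w = "AR-15 Rifle"; · subst e4; decide
  by_cases e5 : w = "AR-10 Rifle"; · subst e5; decide
  by_cases e6 : w = "Tactical Pistol"; · subst e6; decide
  by_cases e7 : w = "Tactical Rifle"; · subst e7; decide
  by_cases e8 : w = "Carbine"; · subst e8; decide
  by_cases e9 : w = "Tactical Carbine"; · subst e9; decide
  by_cases e10 : w = "Pistol"; · subst e10; decide
  by_cases e11 : w = "Revolver"; · subst e11; decide
  by_cases e12 : w = "Derringer"; · subst e12; decide
  by_cases e13 : w = "Shotgun"; · subst e13; decide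
  by_cases e14 : w = "Rifle"; · subst e14; decide
  by_cases e15 : w = "Handgun"; · subst e15; decide
  by_cases e16 : w = "Long gun"; · subst e16; decide
  simp [nodeOf, toNode, parent_mk, PySem.Dict.contains, PySem.Dict.get?, Node.name,
        e1, e2, e3, e4, e5, e6, e7, e8, e9, e10, e11, e12, e13, e14, e15, e16,
        Ne.symm e1, Ne.symm e2, Ne.symm e3, Ne.symm e4, Ne.symm e5, Ne.symm e6, Ne.symm e7,
        Ne.symm e8, Ne.symm e9, Ne.symm e10, Ne.symm e11, Ne.symm e12, Ne.symm e13,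
        Ne.symm e14, Ne.symm e15, Ne.symm e16]

lemma meetS_name (a b : Node) : meetS a.name b.name = (meetN a b).name := by
  cases a <;> cases b <;> decide

lemma levels_eq (w : String) :
    firearm_lvl_5 w = (ancN 4 (toNode w)).map Node.name ∧
    firearm_lvl_4 w = (ancN 3 (toNode w)).map Node.name ∧
    firearm_lvl_3 w = (ancN 2 (toNode w)).map Node.name ∧
    firearm_lvl_2 w = (ancN 1 (toNode w)).map Node.name := by
  by_cases e1 : w = "SMG"; · subst e1; decide
  by_cases e2 : w = "AR-15 Pistol"; · subst e2; decide
  by_cases e3 : w = "AKM Rifle"; · subst e3; decide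
  by_cases e4 : w = "AR-15 Rifle"; · subst e4; decide
  by_cases e5 : w = "AR-10 Rifle"; · subst e5; decide
  by_cases e6 : w = "Tactical Pistol"; · subst e6; decide
  by_cases e7 : w = "Tactical Rifle"; · subst e7; decide
  by_cases e8 : w = "Carbine"; · subst e8; decide
  by_cases e9 : w = "Tactical Carbine"; · subst e9; decide
  by_cases e10 : w = "Pistol"; · subst e10; decide
  by_cases e11 : w = "Revolver"; · subst e11; decide
  by_cases e12 : w = "Derringer"; · subst e12; decide
  by_cases e13 : w = "Shotgun"; · subst e13; decide
  by_cases e14 : w = "Rifle"; · subst e14; decide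
  by_cases e15 : w = "Handgun"; · subst e15; decide
  by_cases e16 : w = "Long gun"; · subst e16; decide
  refine ⟨?_, ?_, ?_, ?_⟩ <;>
  simp [firearm_lvl_5, firearm_lvl_4, firearm_lvl_3, firearm_lvl_2,
        is_handgun, is_longgun, is_shotgun, is_rifle, is_pistol, is_revolver, is_derringer,
        is_carbine, is_tac_rifle, is_tac_pistol,
        longgun_lvl_3, handgun_lvl_3, rifle_lvl_4, tac_rifle_lvl_5, pistol_lvl_4, tac_pistol_lvl_5,
        toNode, ancN,
        e1, e2, e3, e4, e5, e6, e7, e8, e9, e10, e11, e12, e13, e14, e15, e16,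
        Ne.symm e1, Ne.symm e2, Ne.symm e3, Ne.symm e4, Ne.symm e5, Ne.symm e6, Ne.symm e7,
        Ne.symm e8, Ne.symm e9, Ne.symm e10, Ne.symm e11, Ne.symm e12, Ne.symm e13,
        Ne.symm e14, Ne.symm e15, Ne.symm e16] <;> decide

-- ---- set(list) shape lemmas (string level) ----

lemma foldl_add_len_le {α : Type} [BEq α] (l : List α) (s : List α) :
    s.length ≤ (l.foldl PySem.Set.add s).length := by
  induction l generalizing s with
  | nil => simp
  | cons x l ih =>
    refine le_trans ?_ (ih (PySem.Set.add s x))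
    simp [PySem.Set.add]
    split <;> simp

lemma foldl_add_len_eq_iff {α : Type} [BEq α] [LawfulBEq α] (l : List α) (s : List α) :
    (l.foldl PySem.Set.add s).length = s.length ↔ ∀ x ∈ l, x ∈ s := by
  induction l generalizing s with
  | nil => simp
  | cons x l ih =>
    by_cases hx : x ∈ s
    · simp [ih, hx]
    · have hadd : PySem.Set.add s x = s ++ [x] := by simp [PySem.Set.add, PySem.Set.contains, hx]
      have hle := foldl_add_len_le l (s ++ [x])
      simp [hadd] at hle ⊢
      constructor
      · intro h; omega
      · intro h; exact absurd (h.1) hx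

-- 'len(set(a :: l)) == 1' means every element equals the head
lemma ofList_len_one_iff {α : Type} [BEq α] [LawfulBEq α] (a : α) (l : List α) :
    (PySem.Set.ofList (a :: l)).length = 1 ↔ ∀ x ∈ l, x = a := by
  have h1 : PySem.Set.ofList (a :: l) = l.foldl PySem.Set.add [a] := by
    rw [PySem.Set.ofList_eq_foldl]; rfl
  rw [h1]
  simpa using foldl_add_len_eq_iff l [a]

lemma foldl_add_prefix {α : Type} [BEq α] (l : List α) (s : List α) :
    ∃ t, l.foldl PySem.Set.add s = s ++ t := by
  induction l generalizing s with
  | nil => exact ⟨[], by simp⟩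
  | cons x l ih =>
    rcases ih (PySem.Set.add s x) with ⟨t, ht⟩
    by_cases hc : s.contains x = true
    · have hadd : PySem.Set.add s x = s := by simp [PySem.Set.add, hc]
      refine ⟨t, ?_⟩
      show List.foldl PySem.Set.add (PySem.Set.add s x) l = s ++ t
      rw [ht, hadd]
    · have hadd : PySem.Set.add s x = s ++ [x] := by simp [PySem.Set.add, hc]
      refine ⟨[x] ++ t, ?_⟩
      show List.foldl PySem.Set.add (PySem.Set.add s x) l = s ++ ([x] ++ t)
      rw [hadd] at ht
      rw [hadd, ht, List.append_assoc]

lemma ofList_cons_shape (w : String) (rest : List String) :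
    ∃ t, PySem.Set.ofList (w :: rest) = w :: t := by
  have h1 : PySem.Set.ofList (w :: rest) = rest.foldl PySem.Set.add [w] := by
    rw [PySem.Set.ofList_eq_foldl]; rfl
  rcases foldl_add_prefix rest [w] with ⟨t, ht⟩
  exact ⟨t, by rw [h1, ht]; rfl⟩

-- ---- A's level check, characterised through the Node abstraction ----

lemma levelCond (k : Nat) (f : String → Option String)
    (hf : ∀ x, f x = (ancN k (toNode x)).map Node.name) (w : String) (t : List String) :
    ((PySem.Set.ofList ((w :: t).map f)).length = 1 ∧ ((w :: t).map f).headD none ≠ none) ↔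
      k ≤ levelN (FoldN (toNode w) (t.map toNode)) := by
  have hmap : (w :: t).map f = f w :: t.map f := rfl
  rw [hmap]
  rw [ofList_len_one_iff]
  simp only [List.headD_cons]
  constructor
  · rintro ⟨hall, hne⟩
    rcases hc : ancN k (toNode w) with _ | c
    · rw [hf w, hc] at hne; simp at hne
    · have hmem : ∀ m ∈ t.map toNode, ancN k m = some c := by
        intro m hm
        rcases List.mem_map.mp hm with ⟨y, hy, rfl⟩
        have h1 : f y = f w := hall (f y) (List.mem_map_of_mem hy)
        rw [hf y, hf w, hc] at h1
        rcases hc2 : ancN k (toNode y) with _ | c2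
        · rw [hc2] at h1; simp at h1
        · rw [hc2] at h1
          simp only [Option.map_some, Option.some.injEq] at h1
          rw [name_inj c2 c h1]
      have := (fold_anc (t.map toNode) (toNode w) k c).mp ⟨hc, hmem⟩
      exact anc_le _ c k this
  · intro hk
    set M := FoldN (toNode w) (t.map toNode) with hM
    have hanc : ancN k M = some (upN (levelN M - k) M) := by simp [ancN, hk]
    set c := upN (levelN M - k) M with hcdef
    have := (fold_anc (t.map toNode) (toNode w) k c).mpr hanc
    rcases this with ⟨hw, hall⟩
    constructor
    · intro x hx
      rcases List.mem_map.mp hx with ⟨y, hy, rfl⟩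
      rw [hf y, hf w, hw, hall (toNode y) (List.mem_map_of_mem hy)]
    · rw [hf w, hw]; simp

lemma levelVal (k : Nat) (f : String → Option String)
    (hf : ∀ x, f x = (ancN k (toNode x)).map Node.name) (w : String) (t : List String)
    (h : k = levelN (FoldN (toNode w) (t.map toNode))) :
    (((w :: t).map f).headD none).getD "" = (FoldN (toNode w) (t.map toNode)).name := by
  set M := FoldN (toNode w) (t.map toNode) with hM
  have hanc : ancN k M = some M := by rw [h]; exact anc_self M
  have := (fold_anc (t.map toNode) (toNode w) k M).mpr hanc
  rcases this with ⟨hw, _⟩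
  have : ((w :: t).map f).headD none = f w := rfl
  rw [this, hf w, hw]
  rfl

-- ---- B's fold, characterised through the Node abstraction ----

lemma bfold_eq (l : List String) (a : Node) :
    l.foldl (fun acc w =>
        let n := nodeOf w
        match acc with
        | none => some n
        | some x => some (meetS x n)) (some a.name)
      = some ((FoldN a (l.map toNode)).name) := by
  induction l generalizing a with
  | nil => simp [FoldN]
  | cons w l ih =>
    have hstep : meetS a.name (nodeOf w) = (meetN a (toNode w)).name := by
      rw [nodeOf_eq, meetS_name]
    simp only [List.foldl, hstep]
    exact ih (meetN a (toNode w))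

-- ===== VERDICT (by name: the statement is the Claim_ definition above) =====
theorem lcd_spec : Claim_equal_lcd := by
  intro wtypes _
  unfold Spec_lcd
  cases wtypes with
  | nil => decide
  | cons w rest =>
    by_cases hall : ∀ x ∈ rest, x = w
    · -- all elements equal: both return w
      have hA : (PySem.Set.ofList (w :: rest)).length = 1 := (ofList_len_one_iff w rest).mpr hall
      rcases ofList_cons_shape w rest with ⟨t, ht⟩
      have hB : (w :: rest) ≠ [] ∧ (w :: rest).all (fun x => x == (w :: rest).headD "") := by
        refine ⟨by simp, ?_⟩
        simp only [List.headD_cons, List.all_eq_true, beq_iff_eq]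
        intro x hx
        rcases List.mem_cons.mp hx with rfl | hx'
        · rfl
        · exact hall x hx'
      rw [lcd, lcd_alt]
      rw [if_pos hA, if_pos hB, ht]
      rfl
    · -- at least two distinct elements
      have hA : ¬ (PySem.Set.ofList (w :: rest)).length = 1 := by
        rw [ofList_len_one_iff]; exact hall
      have hB : ¬ ((w :: rest) ≠ [] ∧ (w :: rest).all (fun x => x == (w :: rest).headD "")) := by
        rintro ⟨_, h2⟩
        simp only [List.headD_cons, List.all_eq_true, beq_iff_eq] at h2
        exact hall (fun x hx => h2 x (List.mem_cons_of_mem w hx))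
      rcases ofList_cons_shape w rest with ⟨t, ht⟩
      have hmem : ∀ x, x ∈ w :: t ↔ x ∈ w :: rest := by
        intro x
        rw [← ht]
        exact PySem.Set.mem_ofList (y := x) (xs := w :: rest)
      -- the two folds agree (same underlying set of nodes)
      have hfold : FoldN (toNode w) (t.map toNode) = FoldN (toNode w) (rest.map toNode) := by
        apply FoldN_congr
        intro x
        constructor
        · rintro (rfl | hx)
          · exact Or.inl rfl
          · rcases List.mem_map.mp hx with ⟨y, hy, rfl⟩
            rcases List.mem_cons.mp ((hmem y).mp (List.mem_cons_of_mem w hy)) with rfl | hy'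
            · exact Or.inl rfl
            · exact Or.inr (List.mem_map_of_mem hy')
        · rintro (rfl | hx)
          · exact Or.inl rfl
          · rcases List.mem_map.mp hx with ⟨y, hy, rfl⟩
            rcases List.mem_cons.mp ((hmem y).mpr (List.mem_cons_of_mem w hy)) with rfl | hy'
            · exact Or.inl rfl
            · exact Or.inr (List.mem_map_of_mem hy')
      set M := FoldN (toNode w) (t.map toNode) with hM
      -- B's side
      have hBval : lcd_alt (w :: rest) = M.name := by
        rw [lcd_alt, if_neg hB]
        have h0 : (w :: rest).foldl (fun acc w =>
            let n := nodeOf w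
            match acc with
            | none => some n
            | some x => some (meetS x n)) none
            = some ((FoldN (toNode w) (rest.map toNode)).name) := by
          have h1 : ((w :: rest).foldl (fun acc w =>
              let n := nodeOf w
              match acc with
              | none => some n
              | some x => some (meetS x n)) none)
              = rest.foldl (fun acc w =>
              let n := nodeOf w
              match acc with
              | none => some n
              | some x => some (meetS x n)) (some (nodeOf w)) := rfl
          rw [h1, nodeOf_eq, bfold_eq]
        rw [h0, hfold]
      rw [hBval]
      -- A's side: the cascade returns M.name
      have hf5 : ∀ x, firearm_lvl_5 x = (ancN 4 (toNode x)).map Node.name := fun x => (levels_eq x).1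
      have hf4 : ∀ x, firearm_lvl_4 x = (ancN 3 (toNode x)).map Node.name := fun x => (levels_eq x).2.1
      have hf3 : ∀ x, firearm_lvl_3 x = (ancN 2 (toNode x)).map Node.name := fun x => (levels_eq x).2.2.1
      have hf2 : ∀ x, firearm_lvl_2 x = (ancN 1 (toNode x)).map Node.name := fun x => (levels_eq x).2.2.2
      have hc5 := levelCond 4 firearm_lvl_5 hf5 w t
      have hc4 := levelCond 3 firearm_lvl_4 hf4 w t
      have hc3 := levelCond 2 firearm_lvl_3 hf3 w t
      have hc2 := levelCond 1 firearm_lvl_2 hf2 w t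
      rw [← hM] at hc5 hc4 hc3 hc2
      rw [lcd, if_neg hA, ht]
      have hle4 := level_le4 M
      rcases hL : levelN M with _ | _ | _ | _ | _ | L5
      · -- level 0: no level fires, result 'Firearm' = name firearm
        rw [if_neg (by rw [hc5, hL]; omega), if_neg (by rw [hc4, hL]; omega),
            if_neg (by rw [hc3, hL]; omega), if_neg (by rw [hc2, hL]; omega)]
        rw [level_zero M hL]
        rfl
      · rw [if_neg (by rw [hc5, hL]; omega), if_neg (by rw [hc4, hL]; omega),
            if_neg (by rw [hc3, hL]; omega), if_pos (by rw [hc2, hL])]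
        exact levelVal 1 firearm_lvl_2 hf2 w t (by rw [← hM, hL])
      · rw [if_neg (by rw [hc5, hL]; omega), if_neg (by rw [hc4, hL]; omega),
            if_pos (by rw [hc3, hL])]
        exact levelVal 2 firearm_lvl_3 hf3 w t (by rw [← hM, hL])
      · rw [if_neg (by rw [hc5, hL]; omega), if_pos (by rw [hc4, hL])]
        exact levelVal 3 firearm_lvl_4 hf4 w t (by rw [← hM, hL])
      · rw [if_pos (by rw [hc5, hL])]
        exact levelVal 4 firearm_lvl_5 hf5 w t (by rw [← hM, hL])
      · omega
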